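/- GENERATED by mk_final_copies.py from the proof of the farm's unit `start_decoder.F4a` (farm:start_decoder.F4a.1: Proof.lean) as the
   re-elaboration sweep compiled it — do not edit. -/
import Asan.CheckWalk
import Vorbis.Spec.Units.start_decoder_F4a

open X86 X86.User Asan Vorbis Vorbis.Spec Vorbis.Spec.StartDecoder

set_option maxRecDepth 4000
set_option maxHeartbeats 4000000

namespace Vorbis.Spec.start_decoder_F4a

/-- **Segment F4a of `start_decoder`** (0x115494 `mov r12d,[rsp+24H]`: `j = 0`, loaded from the compiler's literal-0 slot Z24 of
`Mid.consts`): the entry assertion `BodyF4` gives the class head `AtClassHead … 0` at `loop19`. One instruction, no store: the loop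
assertion is carried by `Floor.same_mem`; `ClassesUpTo.zero`. -/
theorem f4a_walk {Lay : Layout} (hLay : Lay.hi = 0x1000000) {μ : Microarch} (hμ : UserX.MicroOK μ) {u₀ : State}
    (hcode : HasCodeNat Lay u₀ Vorbis.L.start_decoder.entry Vorbis.Code.code_start_decoder.nat Vorbis.L.start_decoder.size)
    {g : Ghost} {i : Nat} {A5 : Arena} {A : Arena × List Obj} {mc : Int} {v : State} (hat : BodyF4 u₀ g i A5 A mc v) :
    ReachVia Lay μ WayInv v (fun w => AtClassHead u₀ g i A5 A mc 0 w) := by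
  have hfr := hat.loop.frame
  have he := hfr.entry
  v_entry he
  have w_rip := hfr.rip
  -- rsp in the walker's normal form
  have c_rsp : v.reg .rsp = g.e.reg .rsp - 1480 := by
    have h := Floor.rsp_slot hfr 0 1480 (by omega)
    rw [Nat.add_zero] at h
    rw [hfr.rsp, h]
    rfl
  have w_eq : Mem.EqOn Vorbis.L.textLo Vorbis.L.textHi u₀.mem v.mem := hfr.code
  have hdf : v.flags .df = false := (show abiInv _ from hfr.inv).1
  have hmx : v.mxcsr &&& 0x1F80 = 0x1F80 := (show abiInv _ from hfr.inv).2
  have hsse := Vorbis.sseOK_of_abiInv hfr.inv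
  -- the literal-0 slot Z24 (`[rsp + 24H]`), which the instruction loads
  have hz24 : v.mem.readLE (g.e.reg .rsp - 1444) 4 = 0 := by
    have h := hat.loop.mid.consts.z24 (by omega) (by omega)
    unfold Mem.u32 at h
    rw [Floor.rsp_slot hfr 0x24 1444 (by omega)] at h
    exact h
  u_walk hcode [hμ.vendor] until [Vorbis.L.start_decoder.loop19] span [Vorbis.L.textLo, Vorbis.L.textHi] side (v_side)
  -- 0x115499 = loop19: the memory is that of `v`, r12 = 0
  have hinv : abiInv s_115494 := by
    refine ⟨?_, ?_⟩
    · rw [w_flags]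
      exact hdf
    · rw [w_mxcsr]
      exact hmx
  have hrsp : s_115494.reg .rsp = addr g.R := by
    rw [w_kept .rsp rfl]
    exact hfr.rsp
  have hrbp : s_115494.reg .rbp = addr g.f := by
    rw [w_kept .rbp rfl]
    exact hat.loop.rbp
  have hloop := Floor.same_mem hat.loop w_mem w_rip hrsp hrbp hinv
  refine ReachVia.done ⟨⟨hloop, ?_, ?_, ?_⟩, ?_, ?_, ?_⟩
  · rw [w_kept .rbx rfl, w_mem]
    exact hat.rbx
  · rw [w_kept .r13 rfl]
    exact hat.r13
  · rw [w_mem]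
    exact hat.cur
  · rw [w_r12]
    rfl
  · have := hat.cur.mc_lo
    omega
  · exact ClassesUpTo.zero _ _ _

end Vorbis.Spec.start_decoder_F4a

/-- The unit `start_decoder.F4a`: the statement is the claim `SegF4a`. -/
theorem Vorbis.Spec.Worked.start_decoder_F4a_ok : Vorbis.Spec.start_decoder_F4a.Statement := by
  intro Lay hLay μ hμ u₀ hcode g i A5 A mc v hat
  exact Vorbis.Spec.start_decoder_F4a.f4a_walk hLay hμ hcode hat
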